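-- pv_equiv track=rewrite | github.com/cook1e-0707/tokenizer-evidence | src/core/scaffolded_completion.py | _extract_slot_values_from_rendered_text
-- ===== SOURCE A (Python) =====
-- def _extract_slot_values_from_rendered_text(text: str) -> tuple[str, ...]:
--     values: list[str] = []
--     for raw_line in text.splitlines():
--         line = raw_line.strip()
--         if not line:
--             continue
--         for segment in line.split(";"):
--             assignment = segment.strip()
--             if not assignment or "=" not in assignment:
--                 continue
--             _field_name, value = assignment.split("=", 1)
--             values.append(value.strip())
--     return tuple(values)
-- ===== SOURCE B (Python) =====
-- def _extract_slot_values_from_rendered_text(text: str) -> tuple[str, ...]: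
--     # Single flat index scan per line: jump to each '=', capture up to the next
--     # ';' (or end of line), strip; no intermediate split lists are built.
--     values: list[str] = []
--     for line in text.splitlines():
--         i = 0
--         n = len(line)
--         while i < n:
--             if line[i] == "=":
--                 j = i + 1
--                 while j < n and line[j] != ";":
--                     j += 1
--                 values.append(line[i + 1 : j].strip())
--                 i = j
--             else:
--                 i += 1
--     return tuple(values)
-- ===== Notes on version B (the rewrite author's own statement) =====
-- stated objective: alternative
-- what changed: Replaced the nested split(';')/split('=',1) segment loop with a single flat index scan per line that jumps to each '=' and captures up to the next ';', building no intermediate segment lists.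
import Mathlib
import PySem

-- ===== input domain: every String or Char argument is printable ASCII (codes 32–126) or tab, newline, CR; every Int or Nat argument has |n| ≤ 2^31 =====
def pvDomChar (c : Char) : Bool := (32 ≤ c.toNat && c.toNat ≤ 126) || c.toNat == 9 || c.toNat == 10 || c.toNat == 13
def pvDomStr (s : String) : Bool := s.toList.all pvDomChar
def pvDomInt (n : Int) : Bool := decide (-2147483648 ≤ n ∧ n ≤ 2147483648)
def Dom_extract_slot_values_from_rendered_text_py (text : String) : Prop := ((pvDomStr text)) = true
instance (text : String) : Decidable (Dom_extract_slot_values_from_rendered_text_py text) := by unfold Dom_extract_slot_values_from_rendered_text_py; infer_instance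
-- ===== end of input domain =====

-- B replaces A's nested split(';')/split('=',1) segment loop by a single flat scan
-- per line that jumps to each '=' and captures up to the next ';' (objective: alternative).

-- ===== PORT A =====
-- inner loop body: for segment in line.split(";")
def pvSegA (values : List (List Char)) (segment : List Char) : List (List Char) :=
  let assignment := PySem.Chars.strip segment
  if assignment = [] ∨ PySem.Chars.isIn ['='] assignment = false then values
  else
    match PySem.Chars.splitOnMax assignment ['='] 1 with
    | [_field_name, value] => values ++ [PySem.Chars.strip value]
    | _ => values  -- unreachable: split("=", 1) with "=" present yields exactly two pieces

-- outer loop body: for raw_line in text.splitlines()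
def pvLineA (values : List (List Char)) (raw_line : List Char) : List (List Char) :=
  let line := PySem.Chars.strip raw_line
  if line = [] then values
  else (PySem.Chars.splitOn line [';']).foldl pvSegA values

def extract_slot_values_from_rendered_text_py (text : String) : List String :=
  (((PySem.Chars.splitlines text.toList).foldl pvLineA []).map String.ofList)

-- ===== PORT B =====
-- the flat index scan of one line: skip to each '=', capture line[i+1:j] up to ';', strip
def pvScan : List Char → List (List Char)
  | [] => []
  | c :: rest =>
    if c = '=' then
      PySem.Chars.strip (rest.takeWhile (· ≠ ';')) :: pvScan (rest.dropWhile (· ≠ ';'))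
    else
      pvScan rest
termination_by l => l.length
decreasing_by
  · have := List.length_dropWhile_le (fun x => decide (x ≠ ';')) rest
    simp only [List.length_cons]
    omega
  · simp

def extract_slot_values_from_rendered_text_py_alt (text : String) : List String :=
  (((PySem.Chars.splitlines text.toList).foldl (fun values line => values ++ pvScan line) []).map String.ofList)

-- ===== PRECONDITION & SPEC =====
def Spec_extract_slot_values_from_rendered_text_py (text : String) (out : List String) : Prop := out = extract_slot_values_from_rendered_text_py_alt text
instance (text : String) (out : List String) : Decidable (Spec_extract_slot_values_from_rendered_text_py text out) := by unfold Spec_extract_slot_values_from_rendered_text_py; infer_instance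

-- ===== CLAIM (what is proved, stated in full; the proofs are below) =====
def Claim_equal_extract_slot_values_from_rendered_text_py : Prop := ∀ (text : String), Dom_extract_slot_values_from_rendered_text_py text → Spec_extract_slot_values_from_rendered_text_py text (extract_slot_values_from_rendered_text_py text)

-- ===== LEMMAS AND PROOFS =====

-- reference form of Python's line.split(";") as plain structural recursion
def split1 (l : List Char) : List (List Char) :=
  if l.dropWhile (· ≠ ';') = [] then [l.takeWhile (· ≠ ';')]
  else l.takeWhile (· ≠ ';') :: split1 (l.dropWhile (· ≠ ';')).tail
termination_by l.length
decreasing_by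
  rename_i h
  have h2 := List.length_dropWhile_le (fun x => decide (x ≠ ';')) l
  have h3 : (l.dropWhile (· ≠ ';')).length ≠ 0 := by
    simpa using fun hh => h (List.length_eq_zero_iff.mp hh)
  simp only [List.length_tail]
  omega

-- the tail part of split1
def split1Rest (l : List Char) : List (List Char) :=
  if l.dropWhile (· ≠ ';') = [] then []
  else split1 (l.dropWhile (· ≠ ';')).tail

theorem split1_unfold (l : List Char) :
    split1 l = l.takeWhile (· ≠ ';') :: split1Rest l := by
  rw [split1, split1Rest]
  split_ifs <;> rfl

theorem split1Rest_nil : split1Rest [] = [] := by simp [split1Rest]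

theorem split1_nil : split1 [] = [[]] := by
  rw [split1_unfold, split1Rest_nil]
  rfl

theorem split1Rest_cons_semi (r : List Char) : split1Rest (';' :: r) = split1 r := by
  rw [split1Rest]
  simp

theorem split1Rest_cons_ne (c : Char) (r : List Char) (hc : c ≠ ';') :
    split1Rest (c :: r) = split1Rest r := by
  have hd : (c :: r).dropWhile (· ≠ ';') = r.dropWhile (· ≠ ';') := by simp [hc]
  rw [split1Rest, split1Rest, hd]

-- the value(s) one ';'-segment contributes
def segVal (seg : List Char) : List (List Char) :=
  if '=' ∈ seg then [PySem.Chars.strip ((seg.dropWhile (· ≠ '=')).tail)] else []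

theorem segVal_nil : segVal [] = [] := by simp [segVal]

theorem segVal_cons_ne (c : Char) (s : List Char) (hc : c ≠ '=') :
    segVal (c :: s) = segVal s := by
  simp [segVal, hc, Ne.symm hc]

theorem segVal_cons_eq (s : List Char) :
    segVal ('=' :: s) = [PySem.Chars.strip s] := by
  simp [segVal]

-- the per-line normal form both programs compute
def lineVals (l : List Char) : List (List Char) := (split1 l).flatMap segVal

theorem lineVals_unfold (l : List Char) :
    lineVals l = segVal (l.takeWhile (· ≠ ';')) ++ (split1Rest l).flatMap segVal := by
  rw [lineVals, split1_unfold]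
  simp

-- ---- one-step unfoldings of the fuelled PySem loops (definitional) ----

theorem splitOn_go_succ_nil (n : Nat) (cur : List Char) (acc : List (List Char)) :
    PySem.Chars.splitOn.go [';'] (n+1) [] cur acc = (cur.reverse :: acc).reverse := rfl

theorem splitOn_go_succ_cons (n : Nat) (c : Char) (rest cur : List Char) (acc : List (List Char)) :
    PySem.Chars.splitOn.go [';'] (n+1) (c :: rest) cur acc =
      (if [';'].isPrefixOf (c :: rest) then
        PySem.Chars.splitOn.go [';'] n (List.drop 1 (c :: rest)) [] (cur.reverse :: acc)
      else PySem.Chars.splitOn.go [';'] n rest (c :: cur) acc) := rfl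

theorem splitOnMax_go_succ_nil (n m : Nat) (cur : List Char) (acc : List (List Char)) :
    PySem.Chars.splitOnMax.go ['='] (n+1) m [] cur acc = (cur.reverse :: acc).reverse := rfl

theorem splitOnMax_go_succ_zero (n : Nat) (c : Char) (rest cur : List Char) (acc : List (List Char)) :
    PySem.Chars.splitOnMax.go ['='] (n+1) 0 (c :: rest) cur acc =
      ((cur.reverse ++ (c :: rest)) :: acc).reverse := rfl

theorem splitOnMax_go_succ_cons (n m : Nat) (c : Char) (rest cur : List Char) (acc : List (List Char)) :
    PySem.Chars.splitOnMax.go ['='] (n+1) (m+1) (c :: rest) cur acc =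
      (if ['='].isPrefixOf (c :: rest) then
        PySem.Chars.splitOnMax.go ['='] n m (List.drop 1 (c :: rest)) [] (cur.reverse :: acc)
      else PySem.Chars.splitOnMax.go ['='] n (m+1) rest (c :: cur) acc) := rfl

-- ---- splitOn [';'] computes split1 ----

theorem splitOn_go_eq (fuel : Nat) (l cur : List Char) (acc : List (List Char))
    (h : l.length < fuel) :
    PySem.Chars.splitOn.go [';'] fuel l cur acc =
      acc.reverse ++ (cur.reverse ++ l.takeWhile (· ≠ ';')) :: split1Rest l := by
  induction fuel generalizing l cur acc with
  | zero => omega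
  | succ n ih =>
    match l with
    | [] =>
      rw [splitOn_go_succ_nil, split1Rest_nil]
      simp
    | c :: rest =>
      rw [splitOn_go_succ_cons]
      by_cases hc : c = ';'
      · subst hc
        have hp : [';'].isPrefixOf (';' :: rest) = true := by simp [List.isPrefixOf]
        rw [if_pos hp, List.drop_one, List.tail_cons]
        have hlen : rest.length < n := by simp at h; omega
        rw [ih rest [] (cur.reverse :: acc) hlen]
        rw [split1Rest_cons_semi, split1_unfold]
        simp
      · have hp : ¬ ([';'].isPrefixOf (c :: rest) = true) := by
          simp [List.isPrefixOf]
          exact fun hh => hc hh.symm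
        rw [if_neg hp]
        have hlen : rest.length < n := by simp at h; omega
        rw [ih rest (c :: cur) acc hlen]
        rw [split1Rest_cons_ne c rest hc]
        simp [hc]

theorem splitOn_eq_split1 (l : List Char) : PySem.Chars.splitOn l [';'] = split1 l := by
  rw [PySem.Chars.splitOn, splitOn_go_eq (l.length + 1) l [] [] (by omega)]
  rw [split1_unfold]
  simp

-- ---- splitOnMax ['='] 1 on a string containing '=' ----

theorem splitOnMax_go_zero (fuel : Nat) (l cur : List Char) (acc : List (List Char))
    (h : 0 < fuel) :
    PySem.Chars.splitOnMax.go ['='] fuel 0 l cur acc = acc.reverse ++ [cur.reverse ++ l] := by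
  match fuel, h with
  | n + 1, _ =>
    match l with
    | [] => rw [splitOnMax_go_succ_nil]; simp
    | c :: rest => rw [splitOnMax_go_succ_zero]; simp

theorem splitOnMax_go_one (fuel : Nat) (l cur : List Char) (acc : List (List Char))
    (h : l.length < fuel) (hm : '=' ∈ l) :
    PySem.Chars.splitOnMax.go ['='] fuel 1 l cur acc =
      acc.reverse ++ [cur.reverse ++ l.takeWhile (· ≠ '='), (l.dropWhile (· ≠ '=')).tail] := by
  induction fuel generalizing l cur acc with
  | zero => omega
  | succ n ih =>
    match l, hm with
    | c :: rest, hm =>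
      rw [show (1 : Nat) = 0 + 1 from rfl, splitOnMax_go_succ_cons]
      by_cases hc : c = '='
      · subst hc
        have hp : ['='].isPrefixOf ('=' :: rest) = true := by simp [List.isPrefixOf]
        rw [if_pos hp, List.drop_one, List.tail_cons]
        rw [splitOnMax_go_zero n rest [] (cur.reverse :: acc) (by simp at h; omega)]
        simp
      · have hp : ¬ (['='].isPrefixOf (c :: rest) = true) := by
          simp [List.isPrefixOf]
          exact fun hh => hc hh.symm
        rw [if_neg hp]
        have hm2 : '=' ∈ rest := by
          rcases List.mem_cons.mp hm with h1 | h1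
          · exact absurd h1.symm hc
          · exact h1
        have hlen : rest.length < n := by simp at h; omega
        rw [show (0 : Nat) + 1 = 1 from rfl, ih rest (c :: cur) acc hlen hm2]
        simp [hc]

theorem splitOnMax_eq (a : List Char) (hm : '=' ∈ a) :
    PySem.Chars.splitOnMax a ['='] 1 = [a.takeWhile (· ≠ '='), (a.dropWhile (· ≠ '=')).tail] := by
  rw [PySem.Chars.splitOnMax]
  rw [if_neg (by omega)]
  rw [show (1 : Int).toNat = 1 from rfl]
  rw [splitOnMax_go_one (a.length + 1) a [] [] (by omega) hm]
  simp

-- ---- whitespace affixes ----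

theorem space_ne (c : Char) (h : PySem.Chars.isspace c = true) : c ≠ '=' ∧ c ≠ ';' := by
  constructor <;> rintro rfl <;> simp [PySem.Chars.isspace] at h

theorem rstrip_append_space (y w : List Char) (hw : ∀ c ∈ w, PySem.Chars.isspace c = true) :
    PySem.Chars.rstrip (y ++ w) = PySem.Chars.rstrip y := by
  unfold PySem.Chars.rstrip
  rw [List.reverse_append, List.dropWhile_append]
  rw [if_pos]
  simp only [List.isEmpty_iff, List.dropWhile_eq_nil_iff]
  intro c hc
  exact hw c (List.mem_reverse.mp hc)

theorem strip_space_suffix (x w : List Char) (hw : ∀ c ∈ w, PySem.Chars.isspace c = true) :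
    PySem.Chars.strip (x ++ w) = PySem.Chars.strip x := by
  unfold PySem.Chars.strip
  by_cases hx : PySem.Chars.lstrip x = []
  · have hlw : PySem.Chars.lstrip (x ++ w) = [] := by
      unfold PySem.Chars.lstrip at *
      rw [List.dropWhile_append, if_pos (by simp [hx])]
      simp only [List.dropWhile_eq_nil_iff]
      exact hw
    rw [hlw, hx]
  · have hlw : PySem.Chars.lstrip (x ++ w) = PySem.Chars.lstrip x ++ w := by
      unfold PySem.Chars.lstrip at *
      rw [List.dropWhile_append, if_neg (by rw [List.isEmpty_iff]; exact hx)]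
    rw [hlw, rstrip_append_space _ _ hw]

theorem lstrip_decomp (s : List Char) :
    s = s.takeWhile PySem.Chars.isspace ++ PySem.Chars.lstrip s := by
  unfold PySem.Chars.lstrip
  exact (List.takeWhile_append_dropWhile).symm

theorem rstrip_decomp (s : List Char) :
    s = PySem.Chars.rstrip s ++ (s.reverse.takeWhile PySem.Chars.isspace).reverse := by
  unfold PySem.Chars.rstrip
  have h := List.takeWhile_append_dropWhile (p := PySem.Chars.isspace) (l := s.reverse)
  calc s = s.reverse.reverse := by simp
    _ = (s.reverse.takeWhile PySem.Chars.isspace ++ s.reverse.dropWhile PySem.Chars.isspace).reverse := by rw [h]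
    _ = _ := by rw [List.reverse_append]

theorem space_takeWhile (s : List Char) :
    ∀ c ∈ s.takeWhile PySem.Chars.isspace, PySem.Chars.isspace c = true :=
  fun _ hc => List.mem_takeWhile_imp hc

theorem space_takeWhile_rev (s : List Char) :
    ∀ c ∈ (s.reverse.takeWhile PySem.Chars.isspace).reverse, PySem.Chars.isspace c = true :=
  fun c hc => List.mem_takeWhile_imp (List.mem_reverse.mp hc)

-- ---- segVal under whitespace affixes ----

theorem segVal_space_prefix (w s : List Char) (hw : ∀ c ∈ w, PySem.Chars.isspace c = true) :
    segVal (w ++ s) = segVal s := by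
  induction w with
  | nil => simp
  | cons c w2 ih =>
    have hc := (space_ne c (hw c (by simp))).1
    rw [List.cons_append, segVal_cons_ne c _ hc]
    exact ih (fun d hd => hw d (by simp [hd]))

theorem segVal_space_suffix (s w : List Char) (hw : ∀ c ∈ w, PySem.Chars.isspace c = true) :
    segVal (s ++ w) = segVal s := by
  by_cases hm : '=' ∈ s
  · have hmem : '=' ∈ s ++ w := List.mem_append_left _ hm
    have hds : s.dropWhile (· ≠ '=') ≠ [] := by
      intro hh
      have h2 := List.dropWhile_eq_nil_iff.mp hh '=' hm
      simp at h2
    have hdrop : (s ++ w).dropWhile (· ≠ '=') = s.dropWhile (· ≠ '=') ++ w := by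
      rw [List.dropWhile_append, if_neg (by rw [List.isEmpty_iff]; exact hds)]
    obtain ⟨d, d2, hd⟩ := List.exists_cons_of_ne_nil hds
    simp only [segVal, if_pos hm, if_pos hmem, hdrop, hd]
    simp only [List.cons_append, List.tail_cons]
    rw [strip_space_suffix _ _ hw]
  · have hmem : '=' ∉ s ++ w := by
      intro hh
      rcases List.mem_append.mp hh with h1 | h1
      · exact hm h1
      · exact (space_ne '=' (hw _ h1)).1 rfl
    simp [segVal, hm, hmem]

theorem segVal_strip (seg : List Char) : segVal (PySem.Chars.strip seg) = segVal seg := by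
  conv_rhs => rw [lstrip_decomp seg]
  rw [segVal_space_prefix _ _ (space_takeWhile seg)]
  conv_rhs => rw [rstrip_decomp (PySem.Chars.lstrip seg)]
  rw [segVal_space_suffix _ _ (space_takeWhile_rev (PySem.Chars.lstrip seg))]
  rfl

-- ---- A's segment body appends exactly segVal (strip seg) ----

theorem mem_of_isIn_singleton (a : List Char) (h : PySem.Chars.isIn ['='] a = true) : '=' ∈ a := by
  have h2 := (PySem.Chars.isIn_iff_infix ['='] a).mp h
  obtain ⟨s, t, hst⟩ := h2
  subst hst
  simp

theorem isIn_singleton_of_mem (a : List Char) (h : '=' ∈ a) : PySem.Chars.isIn ['='] a = true := by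
  rw [PySem.Chars.isIn_iff_infix]
  obtain ⟨s, t, rfl⟩ := List.append_of_mem h
  exact ⟨s, t, by simp⟩

theorem pvSegA_eq (values : List (List Char)) (seg : List Char) :
    pvSegA values seg = values ++ segVal (PySem.Chars.strip seg) := by
  unfold pvSegA
  by_cases hm : '=' ∈ PySem.Chars.strip seg
  · have hcond : ¬ (PySem.Chars.strip seg = [] ∨
        PySem.Chars.isIn ['='] (PySem.Chars.strip seg) = false) := by
      rintro (h1 | h1)
      · rw [h1] at hm; simp at hm
      · rw [isIn_singleton_of_mem _ hm] at h1; simp at h1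
    rw [if_neg hcond, splitOnMax_eq _ hm]
    simp [segVal, hm]
  · have hfalse : PySem.Chars.isIn ['='] (PySem.Chars.strip seg) = false := by
      cases hb : PySem.Chars.isIn ['='] (PySem.Chars.strip seg) with
      | false => rfl
      | true => exact absurd (mem_of_isIn_singleton _ hb) hm
    rw [if_pos (Or.inr hfalse)]
    simp [segVal, hm]

theorem foldl_pvSegA (segs : List (List Char)) (values : List (List Char)) :
    segs.foldl pvSegA values = values ++ segs.flatMap (fun s => segVal (PySem.Chars.strip s)) := by
  induction segs generalizing values with
  | nil => simp
  | cons s ss ih =>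
    rw [List.foldl_cons, pvSegA_eq, ih, List.flatMap_cons, List.append_assoc]

-- ---- B's scan computes the per-line normal form ----

theorem pvScan_cons_other (c : Char) (r : List Char) (hc : c ≠ '=') :
    pvScan (c :: r) = pvScan r := by
  rw [pvScan]
  simp [hc]

theorem dropWhile_head_semi (l : List Char) (d : Char) (r2 : List Char)
    (h : l.dropWhile (· ≠ ';') = d :: r2) : d = ';' := by
  induction l with
  | nil => simp at h
  | cons c r ih =>
    rw [List.dropWhile_cons] at h
    by_cases hc : c = ';'
    · rw [if_neg (by simp [hc])] at h
      exact ((List.cons.injEq _ _ _ _).mp h).1.symm.trans hc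
    · rw [if_pos (by simp [hc])] at h
      exact ih h

theorem pvScan_eq_lineVals (l : List Char) : pvScan l = lineVals l := by
  induction l using pvScan.induct with
  | case1 =>
    rw [pvScan, lineVals, split1_nil]
    simp [segVal_nil]
  | case2 rest ih =>
    rw [pvScan, if_pos rfl, lineVals_unfold]
    have ht : ('=' :: rest).takeWhile (· ≠ ';') = '=' :: rest.takeWhile (· ≠ ';') := by simp
    rw [ht, segVal_cons_eq, split1Rest_cons_ne '=' rest (by decide)]
    cases hdw : rest.dropWhile (· ≠ ';') with
    | nil =>
      rw [split1Rest, if_pos hdw, pvScan]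
      simp
    | cons d r2 =>
      have hd : d = ';' := dropWhile_head_semi rest d r2 hdw
      subst hd
      rw [split1Rest, if_neg (by rw [hdw]; simp), hdw, List.tail_cons]
      rw [hdw] at ih
      rw [ih, lineVals, split1_unfold (';' :: r2), split1Rest_cons_semi]
      simp [segVal_nil]
  | case3 c rest hc ih =>
    rw [pvScan_cons_other c rest hc, ih]
    by_cases hs : c = ';'
    · subst hs
      conv_rhs => rw [lineVals, split1_unfold (';' :: rest), split1Rest_cons_semi]
      simp [segVal_nil, lineVals]
    · rw [lineVals_unfold, lineVals_unfold, split1Rest_cons_ne c rest hs]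
      have ht : (c :: rest).takeWhile (· ≠ ';') = c :: rest.takeWhile (· ≠ ';') := by simp [hs]
      rw [ht, segVal_cons_ne c _ hc]

theorem pvScan_no_eq (l : List Char) (h : '=' ∉ l) : pvScan l = [] := by
  induction l with
  | nil => rw [pvScan]
  | cons c r ih =>
    rw [pvScan_cons_other c r (by intro hh; exact h (by simp [hh]))]
    exact ih (fun hh => h (by simp [hh]))

theorem pvScan_space_prefix (w l : List Char) (hw : ∀ c ∈ w, PySem.Chars.isspace c = true) :
    pvScan (w ++ l) = pvScan l := by
  induction w with
  | nil => simp
  | cons c w2 ih =>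
    rw [List.cons_append, pvScan_cons_other c _ (space_ne c (hw c (by simp))).1]
    exact ih (fun d hd => hw d (by simp [hd]))

theorem pvScan_space_suffix (l w : List Char) (hw : ∀ c ∈ w, PySem.Chars.isspace c = true) :
    pvScan (l ++ w) = pvScan l := by
  induction l using pvScan.induct with
  | case1 =>
    simp only [List.nil_append]
    rw [pvScan_no_eq w (fun hh => (space_ne '=' (hw _ hh)).1 rfl), pvScan]
  | case2 rest ih =>
    rw [List.cons_append, pvScan, if_pos rfl]
    conv_rhs => rw [pvScan, if_pos rfl]
    have hwsemi : ∀ x ∈ w, (fun x => decide (x ≠ ';')) x = true := by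
      intro x hx; simpa using (space_ne x (hw x hx)).2
    cases hdw : rest.dropWhile (· ≠ ';') with
    | nil =>
      have hall := List.dropWhile_eq_nil_iff.mp hdw
      have htw : rest.takeWhile (· ≠ ';') = rest := List.takeWhile_eq_self_iff.mpr hall
      have htw2 : w.takeWhile (· ≠ ';') = w := List.takeWhile_eq_self_iff.mpr hwsemi
      have ht1 : (rest ++ w).takeWhile (· ≠ ';') = rest ++ w := by
        rw [List.takeWhile_append, if_pos (by rw [htw]), htw2]
      have hd2 : (rest ++ w).dropWhile (· ≠ ';') = [] := by
        rw [List.dropWhile_append, if_pos (by rw [List.isEmpty_iff]; exact hdw)]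
        exact List.dropWhile_eq_nil_iff.mpr hwsemi
      rw [ht1, hd2, strip_space_suffix rest w hw, htw]
    | cons d r2 =>
      have hne : rest.dropWhile (· ≠ ';') ≠ [] := by rw [hdw]; simp
      have hlen : ¬ ((rest.takeWhile (· ≠ ';')).length = rest.length) := by
        intro hl
        have h3 := congrArg List.length
          (List.takeWhile_append_dropWhile (p := fun x => decide (x ≠ ';')) (l := rest))
        simp only [List.length_append] at h3
        have h4 : (rest.dropWhile (· ≠ ';')).length = 0 := by omega
        exact hne (List.length_eq_zero_iff.mp h4)
      have ht1 : (rest ++ w).takeWhile (· ≠ ';') = rest.takeWhile (· ≠ ';') := by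
        rw [List.takeWhile_append, if_neg hlen]
      have hd1 : (rest ++ w).dropWhile (· ≠ ';') = rest.dropWhile (· ≠ ';') ++ w := by
        rw [List.dropWhile_append, if_neg (by rw [List.isEmpty_iff]; exact hne)]
      rw [ht1, hd1, ih, hdw]
  | case3 c rest hc ih =>
    rw [List.cons_append, pvScan_cons_other c _ hc, pvScan_cons_other c _ hc, ih]

theorem pvScan_strip (l : List Char) : pvScan (PySem.Chars.strip l) = pvScan l := by
  conv_rhs => rw [lstrip_decomp l]
  rw [pvScan_space_prefix _ _ (space_takeWhile l)]
  conv_rhs => rw [rstrip_decomp (PySem.Chars.lstrip l)]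
  rw [pvScan_space_suffix _ _ (space_takeWhile_rev (PySem.Chars.lstrip l))]
  rfl

-- ---- A's line body appends exactly pvScan line ----

theorem pvLineA_eq (values : List (List Char)) (line : List Char) :
    pvLineA values line = values ++ pvScan line := by
  unfold pvLineA
  by_cases h : PySem.Chars.strip line = []
  · rw [if_pos h, ← pvScan_strip line, h]
    rw [pvScan]
    simp
  · rw [if_neg h, splitOn_eq_split1, foldl_pvSegA]
    congr 1
    have hcong : ∀ ss : List (List Char),
        ss.flatMap (fun s => segVal (PySem.Chars.strip s)) = ss.flatMap segVal := by
      intro ss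
      induction ss with
      | nil => rfl
      | cons s ss ih => rw [List.flatMap_cons, List.flatMap_cons, segVal_strip, ih]
    rw [hcong, ← pvScan_strip line, pvScan_eq_lineVals]
    rfl

theorem foldl_lines (lines : List (List Char)) (values : List (List Char)) :
    lines.foldl pvLineA values = lines.foldl (fun vs l => vs ++ pvScan l) values := by
  induction lines generalizing values with
  | nil => rfl
  | cons l ls ih => rw [List.foldl_cons, List.foldl_cons, pvLineA_eq, ih]

-- ===== VERDICT (by name: the statement is the Claim_ definition above) =====
theorem extract_slot_values_from_rendered_text_py_spec : Claim_equal_extract_slot_values_from_rendered_text_py := by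
  intro text _
  unfold Spec_extract_slot_values_from_rendered_text_py
  unfold extract_slot_values_from_rendered_text_py extract_slot_values_from_rendered_text_py_alt
  rw [foldl_lines]
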